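-- pv_equiv track=rewrite | github.com/chillymosh/AdventOfCode | 2023/Day 2/python/day2.py | is_game_possible
-- ===== SOURCE A (Python) =====
-- cube_limits = {"red": 12, "green": 13, "blue": 14}
--
-- def is_game_possible(game: str) -> bool:
--     rounds = game.split(": ")[1].split("; ")
--     for colour in cube_limits:
--         max_colour = max(
--             sum(int(score.split(" ")[0]) for score in round.split(", ") if score.endswith(colour)) for round in rounds
--         )
--         if max_colour > cube_limits[colour]:
--             return False
--     return True
-- ===== SOURCE B (Python) =====
-- cube_limits = {"red": 12, "green": 13, "blue": 14}
--
-- def is_game_possible(game: str) -> bool: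
--     max_red = max_green = max_blue = 0
--     for round in game.split(": ")[1].split("; "):
--         red = green = blue = 0
--         for token in round.split(", "):
--             if token.endswith("red"):
--                 red += int(token.split(" ")[0])
--             elif token.endswith("green"):
--                 green += int(token.split(" ")[0])
--             elif token.endswith("blue"):
--                 blue += int(token.split(" ")[0])
--         max_red = max(max_red, red)
--         max_green = max(max_green, green)
--         max_blue = max(max_blue, blue)
--     return max_red <= cube_limits["red"] and max_green <= cube_limits["green"] and max_blue <= cube_limits["blue"]
-- ===== Notes on version B (the rewrite author's own statement) =====
-- stated objective: simpler
-- what changed: Replaces A's three separate colour-by-colour passes (each re-splitting every round and taking a max of generator sums) with a single pass over rounds that tallies red/green/blue sums per round into running maxima, then one final comparison against the limits.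
-- outside the precondition, e.g. on is_game_possible('Game 1: 100 red, x green'): A returns False, B raises ValueError
import Mathlib
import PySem

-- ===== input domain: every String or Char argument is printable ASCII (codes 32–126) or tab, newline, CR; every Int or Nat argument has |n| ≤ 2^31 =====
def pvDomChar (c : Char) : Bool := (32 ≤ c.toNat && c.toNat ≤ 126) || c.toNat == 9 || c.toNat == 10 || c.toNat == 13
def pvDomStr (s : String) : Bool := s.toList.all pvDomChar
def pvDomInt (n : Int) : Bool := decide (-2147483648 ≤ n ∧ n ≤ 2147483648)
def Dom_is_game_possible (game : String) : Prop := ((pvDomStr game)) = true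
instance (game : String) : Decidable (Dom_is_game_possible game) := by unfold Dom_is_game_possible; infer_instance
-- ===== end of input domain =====

-- B replaces A's three colour-by-colour passes over the rounds with one pass accumulating
-- per-colour running maxima, then a single comparison against the limits (objective: simpler).
-- Pre_ excludes inputs on which Python A raises (no colon-space separator, or a malformed count in a
-- colour token A parses) and inputs where A's early return masks a malformed later-colour token
-- that B (which parses every colour token in its single pass) raises on.


-- ===== PORT A =====
-- s.split(sep) with the nonempty literal separators used here; split? is never none then
def pvSplit (s sep : String) : List String := (PySem.Str.split? s sep).getD []

def pv_cube_limits : PySem.Dict String Int :=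
  PySem.Dict.ofList [("red", 12), ("green", 13), ("blue", 14)]

-- int(score.split(" ")[0]); the index 0 always exists; ofStr? = none is a ValueError, excluded by Pre_
def pvParseA (s : String) : Int :=
  (PySem.Int.ofStr? ((PySem.List.pyGet? (pvSplit s " ") 0).getD "")).getD 0

-- sum(int(score.split(" ")[0]) for score in round.split(", ") if score.endswith(colour))
def pvSumA (colour : String) (r : String) : Int :=
  ((pvSplit r ", ").filter (fun s => PySem.Str.endswith s colour)).foldl
    (fun acc s => acc + pvParseA s) 0

-- max(... for round in rounds); rounds is never empty, so the default is never used
def pvMaxColour (rounds : List String) (colour : String) : Int :=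
  (PySem.List.max? (rounds.map (pvSumA colour)) (fun x => x)).getD 0

-- for colour in cube_limits: ... if max_colour > cube_limits[colour]: return False
def pvLoopA (rounds : List String) : List String → Bool
  | [] => true
  | c :: cs =>
      if pvMaxColour rounds c > PySem.Dict.getD pv_cube_limits c 0 then false
      else pvLoopA rounds cs

def is_game_possible (game : String) : Bool :=
  match PySem.List.pyGet? (pvSplit game ": ") 1 with
  | none => false   -- IndexError in Python; excluded by Pre_
  | some rest => pvLoopA (pvSplit rest "; ") (PySem.Dict.keys pv_cube_limits)

-- ===== PORT B =====
-- int(token.split(" ")[0]) in B; ofStr? = none is a ValueError, excluded by Pre_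
def pvNumB (token : String) : Int :=
  (PySem.Int.ofStr? ((PySem.List.pyGet? (pvSplit token " ") 0).getD "")).getD 0

-- the if/elif/elif over one token, updating the (red, green, blue) sums of the round
def pvTokB (acc : Int × Int × Int) (tok : String) : Int × Int × Int :=
  if PySem.Str.endswith tok "red" then (acc.1 + pvNumB tok, acc.2.1, acc.2.2)
  else if PySem.Str.endswith tok "green" then (acc.1, acc.2.1 + pvNumB tok, acc.2.2)
  else if PySem.Str.endswith tok "blue" then (acc.1, acc.2.1, acc.2.2 + pvNumB tok)
  else acc

-- one round: tally the three sums, then fold them into the running maxima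
def pvRoundB (m : Int × Int × Int) (r : String) : Int × Int × Int :=
  let t : Int × Int × Int := (pvSplit r ", ").foldl pvTokB (0, 0, 0)
  (max m.1 t.1, max m.2.1 t.2.1, max m.2.2 t.2.2)

def is_game_possible_alt (game : String) : Bool :=
  match PySem.List.pyGet? (pvSplit game ": ") 1 with
  | none => false   -- IndexError in Python; excluded by Pre_
  | some rest =>
      let m : Int × Int × Int := (pvSplit rest "; ").foldl pvRoundB (0, 0, 0)
      decide (m.1 ≤ PySem.Dict.getD pv_cube_limits "red" 0) &&
      (decide (m.2.1 ≤ PySem.Dict.getD pv_cube_limits "green" 0) &&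
       decide (m.2.2 ≤ PySem.Dict.getD pv_cube_limits "blue" 0))

-- ===== PRECONDITION & SPEC =====
-- Pre_ requires the colon-space separator (else A raises IndexError) and that every token ending in a
-- known colour has an int-parseable first field: on a malformed colour token Python raises
-- ValueError wherever it is parsed — A parses lazily and may return False first, B parses all.
def Pre_is_game_possible (game : String) : Prop :=
  2 ≤ (pvSplit game ": ").length ∧
  ∀ r ∈ pvSplit ((PySem.List.pyGet? (pvSplit game ": ") 1).getD "") "; ",
    ∀ t ∈ pvSplit r ", ",
      (PySem.Str.endswith t "red" = true ∨ PySem.Str.endswith t "green" = true ∨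
       PySem.Str.endswith t "blue" = true) →
      (PySem.Int.ofStr? ((PySem.List.pyGet? (pvSplit t " ") 0).getD "")).isSome = true

instance (game : String) : Decidable (Pre_is_game_possible game) := by
  unfold Pre_is_game_possible; infer_instance

def pvWitness_is_game_possible : String := "Game 1: 3 red, 4 blue; 5 green"

def Spec_is_game_possible (game : String) (out : Bool) : Prop := out = is_game_possible_alt game
instance (game : String) (out : Bool) : Decidable (Spec_is_game_possible game out) := by
  unfold Spec_is_game_possible; infer_instance

-- ===== CLAIM (what is proved, stated in full; the proofs are below) =====
def Claim_equal_is_game_possible : Prop :=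
  ∀ (game : String), Dom_is_game_possible game → Pre_is_game_possible game →
    Spec_is_game_possible game (is_game_possible game)

-- ===== LEMMAS AND PROOFS =====

-- the two ports' int-parsing helpers are the same function
theorem pv_num_eq (t : String) : pvNumB t = pvParseA t := rfl

-- if p is not a suffix of q (and not longer), a string ending with q does not end with p
theorem pv_ends_excl (t p q : String) (hpq : ¬ ("".toList ++ p.toList <:+ q.toList))
    (hlen : p.toList.length ≤ q.toList.length)
    (hq : PySem.Str.endswith t q = true) : PySem.Str.endswith t p = false := by
  by_contra h
  rw [Bool.not_eq_false] at h
  simp only [PySem.Str.endswith_eq, PySem.Chars.endswith_iff] at h hq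
  exact hpq (by simpa using List.suffix_of_suffix_length_le h hq hlen)

-- a token ends with at most one of the three colour names
theorem pv_green_red (t : String) (h : PySem.Str.endswith t "green" = true) :
    PySem.Str.endswith t "red" = false :=
  pv_ends_excl t "red" "green" (by decide) (by decide) h

theorem pv_blue_red (t : String) (h : PySem.Str.endswith t "blue" = true) :
    PySem.Str.endswith t "red" = false :=
  pv_ends_excl t "red" "blue" (by decide) (by decide) h

theorem pv_green_blue (t : String) (h : PySem.Str.endswith t "green" = true) :
    PySem.Str.endswith t "blue" = false :=
  pv_ends_excl t "blue" "green" (by decide) (by decide) h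

-- folding pvTokB accumulates, componentwise, A's filtered sums
theorem pv_tok_fold (toks : List String) (a b c : Int) :
    toks.foldl pvTokB (a, b, c) =
      (a + ((toks.filter (fun s => PySem.Str.endswith s "red")).foldl
              (fun acc s => acc + pvParseA s) 0),
       b + ((toks.filter (fun s => PySem.Str.endswith s "green")).foldl
              (fun acc s => acc + pvParseA s) 0),
       c + ((toks.filter (fun s => PySem.Str.endswith s "blue")).foldl
              (fun acc s => acc + pvParseA s) 0)) := by
  induction toks generalizing a b c with
  | nil => simp
  | cons tok rest ih =>
    cases h1 : PySem.Str.endswith tok "red" with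
    | true =>
      have h2 : PySem.Str.endswith tok "green" = false := by
        by_contra hc
        rw [Bool.not_eq_false] at hc
        rw [pv_green_red tok hc] at h1
        simp at h1
      have h3 : PySem.Str.endswith tok "blue" = false := by
        by_contra hc
        rw [Bool.not_eq_false] at hc
        rw [pv_blue_red tok hc] at h1
        simp at h1
      replace h1 : PySem.Chars.endswith tok.toList ['r','e','d'] = true := by simpa using h1
      replace h2 : PySem.Chars.endswith tok.toList ['g','r','e','e','n'] = false := by
        simpa using h2
      replace h3 : PySem.Chars.endswith tok.toList ['b','l','u','e'] = false := by simpa using h3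
      simp [List.foldl_cons, pvTokB, h1, h2, h3, ih,
            PySem.List.foldl_add, pv_num_eq, add_assoc]
    | false =>
      cases h2 : PySem.Str.endswith tok "green" with
      | true =>
        have h3 : PySem.Str.endswith tok "blue" = false := pv_green_blue tok h2
        replace h1 : PySem.Chars.endswith tok.toList ['r','e','d'] = false := by simpa using h1
        replace h2 : PySem.Chars.endswith tok.toList ['g','r','e','e','n'] = true := by
          simpa using h2
        replace h3 : PySem.Chars.endswith tok.toList ['b','l','u','e'] = false := by
          simpa using h3
        simp [List.foldl_cons, pvTokB, h1, h2, h3, ih,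
              PySem.List.foldl_add, pv_num_eq, add_assoc]
      | false =>
        cases h3 : PySem.Str.endswith tok "blue" with
        | true =>
          replace h1 : PySem.Chars.endswith tok.toList ['r','e','d'] = false := by simpa using h1
          replace h2 : PySem.Chars.endswith tok.toList ['g','r','e','e','n'] = false := by
            simpa using h2
          replace h3 : PySem.Chars.endswith tok.toList ['b','l','u','e'] = true := by
            simpa using h3
          simp [List.foldl_cons, pvTokB, h1, h2, h3, ih,
                PySem.List.foldl_add, pv_num_eq, add_assoc]
        | false =>
          replace h1 : PySem.Chars.endswith tok.toList ['r','e','d'] = false := by simpa using h1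
          replace h2 : PySem.Chars.endswith tok.toList ['g','r','e','e','n'] = false := by
            simpa using h2
          replace h3 : PySem.Chars.endswith tok.toList ['b','l','u','e'] = false := by
            simpa using h3
          simp [List.foldl_cons, pvTokB, h1, h2, h3, ih,
                PySem.List.foldl_add]

theorem pv_round_fold (rounds : List String) (x y z : Int) :
    rounds.foldl pvRoundB (x, y, z) =
      ((rounds.map (pvSumA "red")).foldl max x,
       (rounds.map (pvSumA "green")).foldl max y,
       (rounds.map (pvSumA "blue")).foldl max z) := by
  induction rounds generalizing x y z with
  | nil => rfl
  | cons r rs ih =>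
    simp only [List.foldl_cons, List.map_cons, pvRoundB, pv_tok_fold, pvSumA]
    rw [ih]
    norm_num

-- A's max over a nonempty rounds list vs B's running max from 0
theorem pv_max_from_zero (r0 : String) (rs : List String) (c : String) :
    (rs.map (pvSumA c)).foldl max (max 0 (pvSumA c r0)) =
      max 0 (pvMaxColour (r0 :: rs) c) := by
  rw [pvMaxColour, List.map_cons, PySem.List.max?_id_cons, Option.getD_some,
    List.foldl_assoc]

-- ===== VERDICT (by name: the statement is the Claim_ definition above) =====
theorem is_game_possible_spec : Claim_equal_is_game_possible := by
  intro game _ hpre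
  obtain ⟨hlen, -⟩ := hpre
  unfold Spec_is_game_possible is_game_possible is_game_possible_alt
  obtain ⟨g0, g1, gt, hg⟩ : ∃ g0 g1 gt, pvSplit game ": " = g0 :: g1 :: gt := by
    match h : pvSplit game ": " with
    | [] => rw [h] at hlen; simp at hlen
    | [g0] => rw [h] at hlen; simp at hlen
    | g0 :: g1 :: gt => exact ⟨g0, g1, gt, rfl⟩
  rw [hg]
  have hget : PySem.List.pyGet? (g0 :: g1 :: gt) 1 = some g1 := by
    simp [PySem.List.pyGet?, PySem.List.pyIdx?]
  rw [hget]
  have hkeys : PySem.Dict.keys pv_cube_limits = ["red", "green", "blue"] := by decide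
  have hr : PySem.Dict.getD pv_cube_limits "red" 0 = 12 := by decide
  have hgrn : PySem.Dict.getD pv_cube_limits "green" 0 = 13 := by decide
  have hb : PySem.Dict.getD pv_cube_limits "blue" 0 = 14 := by decide
  match hrounds : pvSplit g1 "; " with
  | [] =>
      dsimp only
      rw [hrounds]
      simp [pvLoopA, hkeys, pvMaxColour, PySem.List.max?, hr, hgrn, hb]
  | r0 :: rs =>
      dsimp only
      rw [hrounds, pv_round_fold]
      simp only [hkeys, pvLoopA, hr, hgrn, hb, List.map_cons, List.foldl_cons]
      rw [pv_max_from_zero, pv_max_from_zero, pv_max_from_zero]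
      by_cases c1 : pvMaxColour (r0 :: rs) "red" > 12 <;>
        by_cases c2 : pvMaxColour (r0 :: rs) "green" > 13 <;>
          by_cases c3 : pvMaxColour (r0 :: rs) "blue" > 14 <;>
            (simp [c1, c2, c3]; try omega)
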